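-- pv_equiv track=rewrite | github.com/hawaroaladar1/examples | gffggf/szupiprim.py | szuperPrimek
-- ===== SOURCE A (Python) =====
-- def isPrim(szam):
--     if szam < 2:
--         return False
--     for i in range(2, szam):
--         if szam % i == 0:
--             return False
--
--     return True
--
-- def szuperPrimek(num):
--
--     primekSzuper = []
--     sorszam = 0
--
--     for i in range(2, num + 1):
--         if isPrim(i):
--             sorszam = sorszam + 1
--             if isPrim(sorszam):
--                 primekSzuper.append(i)
--     return primekSzuper
-- ===== SOURCE B (Python) =====
-- def _is_prime(n):
--     if n < 2:
--         return False
--     d = 2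
--     while d * d <= n:
--         if n % d == 0:
--             return False
--         d += 1
--     return True
--
--
-- def szuperPrimek(num):
--     primes = [p for p in range(2, num + 1) if _is_prime(p)]
--     return [p for i, p in enumerate(primes, 1) if _is_prime(i)]
-- ===== Notes on version B (the rewrite author's own statement) =====
-- stated objective: faster
-- what changed: B replaces A's counting loop with full-range trial division (each candidate divided by every i < n) by a sqrt-bounded trial-division test, builds the prime list with one filter, and selects super-primes by enumerating that list and testing each 1-based index for primality.
import Mathlib
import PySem

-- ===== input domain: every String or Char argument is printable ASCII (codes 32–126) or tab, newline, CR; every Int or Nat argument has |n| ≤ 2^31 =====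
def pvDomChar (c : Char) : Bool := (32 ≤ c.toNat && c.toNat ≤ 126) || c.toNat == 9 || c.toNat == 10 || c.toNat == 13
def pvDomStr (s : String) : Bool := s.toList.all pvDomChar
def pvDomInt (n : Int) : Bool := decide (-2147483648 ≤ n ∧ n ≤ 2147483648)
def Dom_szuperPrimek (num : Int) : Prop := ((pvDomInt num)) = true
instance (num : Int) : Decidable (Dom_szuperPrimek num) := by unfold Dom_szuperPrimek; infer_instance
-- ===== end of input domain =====

-- B replaces A's full-range trial division and counting loop by a sqrt-bounded
-- primality test plus an enumerate/filter over the prime list (objective: faster).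

-- ===== PORT A =====
def isPrim (szam : Int) : Bool :=
  if szam < 2 then false
  else (PySem.List.pyRange 2 szam 1).all (fun i => !(PySem.Int.mod szam i == 0))

def szuperPrimek (num : Int) : List Int :=
  ((PySem.List.pyRange 2 (num + 1) 1).foldl
    (fun (st : List Int × Int) i =>
      if isPrim i then
        let sorszam := st.2 + 1
        ((if isPrim sorszam then st.1 ++ [i] else st.1), sorszam)
      else st)
    ([], 0)).1

-- ===== PORT B =====
def isPrimeSqrtAux (n : Int) (d : Int) : Bool :=
  if h : d * d ≤ n then
    (if PySem.Int.mod n d == 0 then false else isPrimeSqrtAux n (d + 1))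
  else true
termination_by (n + 2 - d).toNat
decreasing_by
  have hd : d ≤ d * d := by nlinarith [sq_nonneg (d - 1)]
  omega

def isPrimeSqrt (n : Int) : Bool :=
  if n < 2 then false else isPrimeSqrtAux n 2

def szuperPrimek_alt (num : Int) : List Int :=
  let primes := (PySem.List.pyRange 2 (num + 1) 1).filter isPrimeSqrt
  ((PySem.List.enumerate primes 1).filter (fun p => isPrimeSqrt p.1)).map (·.2)

-- ===== PRECONDITION & SPEC =====
def Spec_szuperPrimek (num : Int) (out : List Int) : Prop := out = szuperPrimek_alt num
instance (num : Int) (out : List Int) : Decidable (Spec_szuperPrimek num out) := by unfold Spec_szuperPrimek; infer_instance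

-- ===== CLAIM (what is proved, stated in full; the proofs are below) =====
def Claim_equal_szuperPrimek : Prop := ∀ (num : Int), Dom_szuperPrimek num → Spec_szuperPrimek num (szuperPrimek num)

-- ===== LEMMAS AND PROOFS =====

-- A's test says: no divisor i with 2 ≤ i < n.
lemma isPrim_iff (n : Int) :
    isPrim n = true ↔ 2 ≤ n ∧ ∀ i : Int, 2 ≤ i → i < n → ¬ i ∣ n := by
  unfold isPrim
  by_cases h : n < 2
  · simp [h]
  · simp only [h, if_false, List.all_eq_true]
    constructor
    · intro hall
      refine ⟨by omega, fun i h2 hlt hdvd => ?_⟩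
      have := hall i (by rw [PySem.List.mem_pyRange_one]; omega)
      rw [← PySem.Int.mod_eq_zero_iff_dvd] at hdvd
      simp [hdvd] at this
    · intro ⟨_, hfor⟩ i hi
      rw [PySem.List.mem_pyRange_one] at hi
      have := hfor i hi.1 hi.2
      rw [← PySem.Int.mod_eq_zero_iff_dvd] at this
      simpa using this

-- B's aux loop says: no divisor e ≥ d with e*e ≤ n.
lemma isPrimeSqrtAux_iff (n : Int) (d : Int) (hd : 1 ≤ d) :
    isPrimeSqrtAux n d = true ↔ ∀ e : Int, d ≤ e → e * e ≤ n → ¬ e ∣ n := by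
  fun_induction isPrimeSqrtAux n d with
  | case1 d h hmod =>
    simp only [Bool.false_eq_true, false_iff]
    intro hall
    exact hall d le_rfl h ((PySem.Int.mod_eq_zero_iff_dvd n d).mp (by simpa using hmod))
  | case2 d h hmod ih =>
    rw [ih (by omega)]
    constructor
    · intro hall e hde hee
      rcases eq_or_lt_of_le hde with rfl | hlt
      · exact fun hdvd => hmod (by simpa using (PySem.Int.mod_eq_zero_iff_dvd n d).mpr hdvd)
      · exact hall e (by omega) hee
    · intro hall e hde hee; exact hall e (by omega) hee
  | case3 d h =>
    simp only [true_iff]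
    intro e hde hee hdvd
    exact h (le_trans (by nlinarith) hee)

-- The two primality tests agree on every Int.
lemma isPrim_eq_isPrimeSqrt : isPrim = isPrimeSqrt := by
  funext n
  by_cases h2 : n < 2
  · unfold isPrim isPrimeSqrt; simp [h2]
  · have hn : 2 ≤ n := by omega
    rcases hA : isPrim n with _ | _ <;> rcases hB : isPrimeSqrt n with _ | _
    · rfl
    · -- A says composite, B says prime: a divisor 2 ≤ i < n gives one with e*e ≤ n
      exfalso
      have hB' : isPrimeSqrtAux n 2 = true := by
        unfold isPrimeSqrt at hB; simpa [h2] using hB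
      rw [isPrimeSqrtAux_iff n 2 (by norm_num)] at hB'
      have hA' : ¬ (2 ≤ n ∧ ∀ i : Int, 2 ≤ i → i < n → ¬ i ∣ n) := by
        rw [← isPrim_iff, hA]; simp
      push Not at hA'
      obtain ⟨i, h2i, hin, hidvd⟩ := hA' hn
      obtain ⟨m, hm⟩ := id hidvd
      have hmpos : 0 < m := by nlinarith
      have hm1 : m ≠ 1 := fun h => by rw [h, mul_one] at hm; omega
      have hm2 : 2 ≤ m := by omega
      rcases le_total i m with hle | hle
      · exact hB' i h2i (by nlinarith) hidvd
      · exact hB' m hm2 (by nlinarith) ⟨i, by rw [hm]; ring⟩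
    · -- B says composite, A says prime
      exfalso
      have hA' := (isPrim_iff n).mp hA
      have hB' : isPrimeSqrtAux n 2 = false := by
        unfold isPrimeSqrt at hB; simpa [h2] using hB
      have : ¬ ∀ e : Int, 2 ≤ e → e * e ≤ n → ¬ e ∣ n := by
        intro hall
        have ht := (isPrimeSqrtAux_iff n 2 (by norm_num)).mpr hall
        rw [hB'] at ht; simp at ht
      push Not at this
      obtain ⟨e, h2e, hee, hedvd⟩ := this
      have hen : e < n := by nlinarith
      exact hA'.2 e h2e hen hedvd
    · rfl

-- the selected sublist: every element of ps whose 1-based position (starting at k) is prime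
def sel (ps : List Int) (k : Int) : List Int :=
  match ps with
  | [] => []
  | p :: t => (if isPrim k then [p] else []) ++ sel t (k + 1)

lemma foldA_eq_sel (xs : List Int) (c : Int) (acc : List Int) :
    ((xs.foldl
      (fun (st : List Int × Int) i =>
        if isPrim i then
          let sorszam := st.2 + 1
          ((if isPrim sorszam then st.1 ++ [i] else st.1), sorszam)
        else st)
      (acc, c)).1) = acc ++ sel (xs.filter isPrim) (c + 1) := by
  induction xs generalizing c acc with
  | nil => simp [sel]
  | cons x t ih =>
    by_cases hx : isPrim x
    · simp only [List.foldl_cons, List.filter_cons, hx, if_pos]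
      by_cases hc : isPrim (c + 1) <;>
        simp [hc, ih, sel, List.append_assoc]
    · simp [List.foldl_cons, hx, ih]

lemma enumFilter_eq_sel (ps : List Int) (s : Int) :
    ((PySem.List.enumerate ps s).filter (fun p => isPrim p.1)).map (·.2) = sel ps s := by
  induction ps generalizing s with
  | nil => simp [PySem.List.enumerate_nil, sel]
  | cons p t ih =>
    rw [PySem.List.enumerate_cons]
    by_cases hs : isPrim s <;> simp [sel, hs, ih]

-- ===== VERDICT (by name: the statement is the Claim_ definition above) =====
theorem szuperPrimek_spec : Claim_equal_szuperPrimek := by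
  intro num _
  unfold Spec_szuperPrimek szuperPrimek szuperPrimek_alt
  rw [foldA_eq_sel]
  rw [← isPrim_eq_isPrimeSqrt]
  rw [enumFilter_eq_sel]
  simp
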